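-- pv_equiv track=rewrite | github.com/natansales221/Interaction-projects | VagasEstacionamento.py | preench_automatic
-- ===== SOURCE A (Python) =====
-- def preench_automatic(vagas):
--
--     qtd_vaga_disp = {}
--
--     for bloco, vaga_disp in vagas.items():
--         qtd_vaga_disp[bloco] = vaga_disp.count('-')
--
--     ordem_bloco = sorted(qtd_vaga_disp, key= qtd_vaga_disp.get, reverse=True)
--
--     for bloco in ordem_bloco:
--
--         for i, vaga in enumerate(vagas[bloco]):
--
--             if vaga == '-':
--
--                 vagas[bloco][i] ='X'
--
--                 return True
--
--     return False
-- ===== SOURCE B (Python) =====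
-- def preench_automatic(vagas):
--     # One argmax pass (strict > keeps the first-inserted block on ties,
--     # matching the stable descending sort) plus a single fill scan.
--     best = None
--     best_count = 0
--     for bloco, vaga_disp in vagas.items():
--         c = vaga_disp.count('-')
--         if best_count < c:
--             best, best_count = bloco, c
--     if best_count == 0:
--         return False
--     lista = vagas[best]
--     for i, vaga in enumerate(lista):
--         if vaga == '-':
--             lista[i] = 'X'
--             break
--     return True
-- ===== Notes on version B (the rewrite author's own statement) =====
-- stated objective: simpler
-- what changed: Replaces A's build-a-counts-dict, stable-descending-sort and scan-all-blocks pipeline with a single argmax pass over vagas.items() (strict > so the first-inserted block wins ties, matching the stable sort) followed by one fill scan of the chosen block; no auxiliary dict and no sorting. Pre_ only excludes association lists with duplicate keys, which do not represent any Python dict.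
import Mathlib
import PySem

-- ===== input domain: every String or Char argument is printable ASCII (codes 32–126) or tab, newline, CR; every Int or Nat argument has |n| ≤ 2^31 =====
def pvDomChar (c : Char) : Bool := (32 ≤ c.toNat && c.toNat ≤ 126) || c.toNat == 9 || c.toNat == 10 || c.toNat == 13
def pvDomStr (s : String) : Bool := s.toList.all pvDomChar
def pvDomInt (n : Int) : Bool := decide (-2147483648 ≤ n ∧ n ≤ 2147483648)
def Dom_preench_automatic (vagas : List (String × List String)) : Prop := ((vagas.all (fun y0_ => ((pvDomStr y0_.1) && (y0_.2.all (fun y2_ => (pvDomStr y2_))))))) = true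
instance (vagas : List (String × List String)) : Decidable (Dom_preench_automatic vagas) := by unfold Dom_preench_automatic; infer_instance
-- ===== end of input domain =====

-- B replaces A's build-counts-dict / stable-sort / scan-all-blocks pipeline by a single
-- strict-> argmax pass plus one fill scan (simpler, no sort).  A and B both mutate the
-- argument dict in the same way; the equivalence proved here is about the RETURN value.
-- B replaces A's build-counts-dict / stable-sort / scan-all-blocks pipeline by a single
-- strict-< argmax pass plus one fill scan (simpler, no sort).  A and B both mutate the
-- argument dict in the same way; the equivalence proved here is about the RETURN value.
-- ===== PORT A =====
-- inner 'for i, vaga in enumerate(...)': returns True at the first '-' (the in-place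
-- write vagas[bloco][i]='X' only mutates the argument, not the return value)
def pvFillScanA : List String → Bool
  | [] => false
  | vaga :: rest => if vaga = "-" then true else pvFillScanA rest

-- outer 'for bloco in ordem_bloco'; 'vagas[bloco]' always succeeds (bloco comes from
-- vagas' own keys), ported as getD with an unreachable default []
def pvBlocoLoopA (vagas : List (String × List String)) : List String → Bool
  | [] => false
  | bloco :: rest =>
      if pvFillScanA ((PySem.Dict.mk vagas).getD bloco []) then true
      else pvBlocoLoopA vagas rest

def preench_automatic (vagas : List (String × List String)) : Bool :=
  let qtd_vaga_disp : PySem.Dict String Int :=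
    vagas.foldl (fun d p => d.insert p.1 ((PySem.List.count p.2 "-" : Int))) PySem.Dict.empty
  -- sorted(qtd_vaga_disp, key=qtd_vaga_disp.get, reverse=True); every key is present,
  -- so qtd_vaga_disp.get is getD _ 0
  let ordem_bloco :=
    PySem.List.sorted qtd_vaga_disp.keys (fun b => qtd_vaga_disp.getD b 0) true
  pvBlocoLoopA vagas ordem_bloco

-- ===== PORT B =====
def preench_automatic_alt (vagas : List (String × List String)) : Bool :=
  -- single argmax pass: (best, best_count) with strict '<' so the first block wins ties
  let st := vagas.foldl
    (fun (st : Option String × Int) p =>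
      if st.2 < (PySem.List.count p.2 "-" : Int) then (some p.1, (PySem.List.count p.2 "-" : Int))
      else st)
    ((none : Option String), (0 : Int))
  -- 'if best_count == 0: return False'; otherwise the fill loop writes 'X' into
  -- vagas[best] in place and breaks, and the function returns True
  if st.2 = 0 then false else true

-- ===== PRECONDITION & SPEC =====
-- Pre_ excludes association lists with duplicate keys: they do not represent any Python
-- dict (a dict cannot hold two entries with the same key), so no behaviour is specified there.
def Pre_preench_automatic (vagas : List (String × List String)) : Prop :=
  (vagas.map (fun p => p.1)).Nodup

instance (vagas : List (String × List String)) : Decidable (Pre_preench_automatic vagas) := by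
  unfold Pre_preench_automatic; infer_instance

def pvWitness_preench_automatic : (List (String × List String)) :=
  [("A", ["X", "-"]), ("B", ["-", "-"]), ("C", ["X"])]

def Spec_preench_automatic (vagas : List (String × List String)) (out : Bool) : Prop :=
  out = preench_automatic_alt vagas
instance (vagas : List (String × List String)) (out : Bool) :
    Decidable (Spec_preench_automatic vagas out) := by
  unfold Spec_preench_automatic; infer_instance

-- ===== CLAIM (what is proved, stated in full; the proofs are below) =====
def Claim_equal_preench_automatic : Prop :=
  ∀ (vagas : List (String × List String)), Dom_preench_automatic vagas →
    Pre_preench_automatic vagas → Spec_preench_automatic vagas (preench_automatic vagas)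

-- ===== LEMMAS AND PROOFS =====

theorem pvFillScanA_eq_true_iff (l : List String) : pvFillScanA l = true ↔ "-" ∈ l := by
  induction l with
  | nil => simp [pvFillScanA]
  | cons v rest ih =>
      simp only [pvFillScanA, List.mem_cons]
      split_ifs with h
      · simp [h]
      · simp [ih, Ne.symm h]

theorem pvBlocoLoopA_eq_true_iff (vagas : List (String × List String)) (bs : List String) :
    pvBlocoLoopA vagas bs = true ↔
      ∃ b ∈ bs, pvFillScanA ((PySem.Dict.mk vagas).getD b []) = true := by
  induction bs with
  | nil => simp [pvBlocoLoopA]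
  | cons b rest ih =>
      simp only [pvBlocoLoopA]
      split_ifs with h
      · simp [h]
      · simp only [List.mem_cons, ih]
        constructor
        · rintro ⟨x, hx, hsc⟩; exact ⟨x, Or.inr hx, hsc⟩
        · rintro ⟨x, hx | hx, hsc⟩
          · exact absurd (hx ▸ hsc) h
          · exact ⟨x, hx, hsc⟩

-- the second component of B's argmax fold is a plain max-fold over the counts
theorem pvAltFold_snd (l : List (String × List String)) (s : Option String × Int) :
    (l.foldl
        (fun (st : Option String × Int) p =>
          if st.2 < (PySem.List.count p.2 "-" : Int) then
            (some p.1, (PySem.List.count p.2 "-" : Int))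
          else st) s).2 =
      l.foldl
        (fun (a : Int) p =>
          if a < (PySem.List.count p.2 "-" : Int) then (PySem.List.count p.2 "-" : Int) else a)
        s.2 := by
  induction l generalizing s with
  | nil => rfl
  | cons p rest ih =>
      simp only [List.foldl_cons]
      rw [ih]
      split_ifs <;> rfl

theorem pvMaxFold_pos_iff (l : List (String × List String)) (a : Int) :
    (0 < l.foldl
        (fun (a : Int) p =>
          if a < (PySem.List.count p.2 "-" : Int) then (PySem.List.count p.2 "-" : Int) else a)
        a) ↔ 0 < a ∨ ∃ p ∈ l, 0 < (PySem.List.count p.2 "-" : Int) := by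
  induction l generalizing a with
  | nil => simp
  | cons p rest ih =>
      simp only [List.foldl_cons, List.mem_cons, ih]
      constructor
      · rintro (h | ⟨q, hq, hc⟩)
        · by_cases hlt : a < (PySem.List.count p.2 "-" : Int)
          · simp only [if_pos hlt] at h; exact Or.inr ⟨p, Or.inl rfl, h⟩
          · simp only [if_neg hlt] at h; exact Or.inl h
        · exact Or.inr ⟨q, Or.inr hq, hc⟩
      · rintro (h | ⟨q, hq | hq, hc⟩)
        · split_ifs with hlt
          · exact Or.inl (lt_of_lt_of_le h (le_of_lt hlt))
          · exact Or.inl h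
        · subst hq
          split_ifs with hlt
          · exact Or.inl hc
          · exact Or.inl (lt_of_lt_of_le hc (le_of_not_gt hlt))
        · exact Or.inr ⟨q, hq, hc⟩

theorem pvMaxFold_le (l : List (String × List String)) (a : Int) :
    a ≤ l.foldl
        (fun (a : Int) p =>
          if a < (PySem.List.count p.2 "-" : Int) then (PySem.List.count p.2 "-" : Int) else a)
        a := by
  induction l generalizing a with
  | nil => exact le_refl a
  | cons p rest ih =>
      simp only [List.foldl_cons]
      refine le_trans ?_ (ih _)
      split_ifs with hlt
      · exact le_of_lt hlt
      · exact le_refl a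

theorem pvCount_pos (l : List String) :
    (0 < (PySem.List.count l "-" : Int)) ↔ "-" ∈ l := by
  simp [PySem.List.count_eq, List.count_pos_iff]

theorem pvIte_zero (F : Int) (h0 : 0 ≤ F) :
    ((if F = 0 then false else true) = true) ↔ 0 < F := by
  split_ifs with h
  · simp only [false_iff]; omega
  · simp only [true_iff]; omega

theorem preench_automatic_alt_eq_true_iff (vagas : List (String × List String)) :
    preench_automatic_alt vagas = true ↔ ∃ p ∈ vagas, "-" ∈ p.2 := by
  simp only [preench_automatic_alt]
  rw [pvAltFold_snd]
  rw [pvIte_zero _ (pvMaxFold_le vagas 0)]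
  rw [pvMaxFold_pos_iff]
  simp only [lt_self_iff_false, false_or, pvCount_pos]

theorem pvSet_update_nil (xs : List String) :
    PySem.Set.update ([] : PySem.Set String) xs = PySem.Set.ofList xs := rfl

theorem preench_automatic_eq_true_iff (vagas : List (String × List String))
    (hnd : (vagas.map (fun p => p.1)).Nodup) :
    preench_automatic vagas = true ↔ ∃ p ∈ vagas, "-" ∈ p.2 := by
  have hkm : (PySem.Dict.mk vagas).keys = vagas.map (fun p => p.1) :=
    PySem.Dict.keys_mk vagas
  have hndk : (PySem.Dict.mk vagas).keys.Nodup := by rw [hkm]; exact hnd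
  simp only [preench_automatic]
  rw [pvBlocoLoopA_eq_true_iff]
  have hmem : ∀ b : String,
      b ∈ PySem.List.sorted
          (vagas.foldl (fun d p => d.insert p.1 ((PySem.List.count p.2 "-" : Int)))
            PySem.Dict.empty).keys
          (fun b =>
            (vagas.foldl (fun d p => d.insert p.1 ((PySem.List.count p.2 "-" : Int)))
              PySem.Dict.empty).getD b 0)
          true
        ↔ b ∈ vagas.map (fun p => p.1) := by
    intro b
    rw [PySem.List.mem_sorted, PySem.Dict.keys_foldl_insert_key, PySem.Dict.keys_empty,
      pvSet_update_nil, PySem.Set.mem_ofList]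
  simp only [hmem]
  constructor
  · rintro ⟨b, hb, hsc⟩
    obtain ⟨v, hv⟩ : ∃ v, (PySem.Dict.mk vagas).get? b = some v := by
      cases h : (PySem.Dict.mk vagas).get? b with
      | none =>
          exact absurd hb (by
            have := (PySem.Dict.get?_eq_none_iff_not_mem_keys _ _).mp h
            rw [hkm] at this; exact this)
      | some v => exact ⟨v, rfl⟩
    have hitems : (b, v) ∈ vagas :=
      (PySem.Dict.get?_eq_some_iff_mem_items _ _ _ hndk).mp hv
    rw [PySem.Dict.getD_of_get?_eq_some _ _ hv, pvFillScanA_eq_true_iff] at hsc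
    exact ⟨(b, v), hitems, hsc⟩
  · rintro ⟨⟨b, v⟩, hp, hm⟩
    refine ⟨b, List.mem_map_of_mem hp, ?_⟩
    have hgd : (PySem.Dict.mk vagas).getD b [] = v :=
      PySem.Dict.getD_of_mem_items _ hp hndk []
    rw [hgd, pvFillScanA_eq_true_iff]
    exact hm

-- ===== VERDICT (by name: the statement is the Claim_ definition above) =====
theorem preench_automatic_spec : Claim_equal_preench_automatic := by
  intro vagas _ hpre
  unfold Spec_preench_automatic
  rw [Bool.eq_iff_iff, preench_automatic_eq_true_iff vagas hpre,
    preench_automatic_alt_eq_true_iff vagas]
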